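-- pv_equiv track=rewrite | github.com/ifNotErrorRun/AlgorithmStudy | sehun/10week/BOJ_4673.py | get_ctor_num
-- ===== SOURCE A (Python) =====
-- def get_ctor_num(input: int):
--     # i를 str로 형변환하고 리스트로 변환한 뒤 반복문으로 각 자리수 뽑아온 뒤 int로 형변환하기
--     jari = list(str(input))
--     sum = 0
--     result = 0
--     for i in range(len(jari)):
--         sum += int(jari[i])
--     result = sum + input
--     # 각 자리수 더한값과 원래값을 합하여 return
--     if result > 10000:
--         return 0
--     else:
--         return result
-- ===== SOURCE B (Python) =====
-- def get_ctor_num(input: int):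
--     # extract digits arithmetically with a divmod loop instead of via str()
--     n = input
--     digit_sum = 0
--     while n > 0:
--         digit_sum += n % 10
--         n //= 10
--     result = digit_sum + input
--     return 0 if result > 10000 else result
-- ===== Notes on version B (the rewrite author's own statement) =====
-- stated objective: alternative
-- what changed: Digits are extracted arithmetically with a n%10 / n//=10 loop instead of converting the number to a string and parsing each character back with int().
import Mathlib
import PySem

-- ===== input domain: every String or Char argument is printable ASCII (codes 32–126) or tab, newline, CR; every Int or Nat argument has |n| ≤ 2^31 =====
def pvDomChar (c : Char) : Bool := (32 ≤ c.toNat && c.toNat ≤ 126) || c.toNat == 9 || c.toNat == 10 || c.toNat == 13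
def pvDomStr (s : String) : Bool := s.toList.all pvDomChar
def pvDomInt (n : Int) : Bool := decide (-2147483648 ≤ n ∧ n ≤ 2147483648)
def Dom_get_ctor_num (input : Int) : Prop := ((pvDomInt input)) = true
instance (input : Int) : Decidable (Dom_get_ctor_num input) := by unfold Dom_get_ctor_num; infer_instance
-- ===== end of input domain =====

-- B extracts digits arithmetically (n % 10 / n //= 10) instead of converting to a string and
-- parsing each character back with int(); return value only, no side effects either way.

-- ===== PORT A =====
-- int(jari[i]) : ofChars? is none exactly where Python's int() raises ValueError (the '-' of a
-- negative input) — those inputs are excluded by Pre_; the pyGetD default ' ' is unreachable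
-- because i ranges over range(len(jari)).
def get_ctor_num (input : Int) : Int :=
  let jari := PySem.Int.toChars input
  let sum := (PySem.List.pyRange 0 (PySem.List.len jari) 1).foldl
    (fun s i => s + (PySem.Int.ofChars? [PySem.List.pyGetD jari i ' ']).getD 0) 0
  let result := sum + input
  if result > 10000 then 0 else result

-- ===== PORT B =====
-- the while-loop of Source B: while n > 0: digit_sum += n % 10; n //= 10
-- (fuel makes the recursion structural; input.toNat + 1 iterations always suffice)
def pvDigitLoop (fuel : Nat) (n acc : Int) : Int :=
  match fuel with
  | 0 => acc
  | f + 1 =>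
    if 0 < n then
      pvDigitLoop f (PySem.Int.floordiv n 10) (acc + PySem.Int.mod n 10)
    else acc

def get_ctor_num_alt (input : Int) : Int :=
  let digit_sum := pvDigitLoop (input.toNat + 1) input 0
  let result := digit_sum + input
  if result > 10000 then 0 else result

-- ===== PRECONDITION & SPEC =====
-- A raises ValueError on negative inputs (int('-') on the sign character), so Pre_ is 0 ≤ input.
def Pre_get_ctor_num (input : Int) : Prop := 0 ≤ input
instance (input : Int) : Decidable (Pre_get_ctor_num input) := by unfold Pre_get_ctor_num; infer_instance
def pvWitness_get_ctor_num : Int := 137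

def Spec_get_ctor_num (input : Int) (out : Int) : Prop := out = get_ctor_num_alt input
instance (input : Int) (out : Int) : Decidable (Spec_get_ctor_num input out) := by unfold Spec_get_ctor_num; infer_instance

-- ===== CLAIM (what is proved, stated in full; the proofs are below) =====
def Claim_equal_get_ctor_num : Prop := ∀ (input : Int), Dom_get_ctor_num input → Pre_get_ctor_num input → Spec_get_ctor_num input (get_ctor_num input)

-- ===== LEMMAS AND PROOFS =====

-- the value int() assigns to one character, as the A-port computes it
def pvCharVal (c : Char) : Int := (PySem.Int.ofChars? [c]).getD 0

-- reference digit sum on Nat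
def pvNatDigitSum (n : Nat) : Int :=
  if n = 0 then 0 else (n % 10 : Nat) + pvNatDigitSum (n / 10)

theorem pvNatDigitSum_unfold (n : Nat) :
    pvNatDigitSum n = (n % 10 : Nat) + pvNatDigitSum (n / 10) := by
  rw [pvNatDigitSum]
  rcases Nat.eq_zero_or_pos n with h | h
  · subst h; simp [pvNatDigitSum]
  · simp [Nat.pos_iff_ne_zero.mp h]

theorem pvCharVal_digitChar (d : Nat) (hd : d < 10) :
    pvCharVal (Nat.digitChar d) = (d : Int) := by
  interval_cases d <;> decide

theorem pvToDigitsCore_sum (f : Nat) :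
    ∀ (n : Nat) (acc : List Char), n < f →
    ((Nat.toDigitsCore 10 f n acc).map pvCharVal).sum
      = pvNatDigitSum n + (acc.map pvCharVal).sum := by
  induction f with
  | zero => intro n acc h; omega
  | succ f ih =>
    intro n acc h
    rw [Nat.toDigitsCore]
    by_cases h10 : n / 10 = 0
    · simp only [h10, if_true, List.map_cons, List.sum_cons]
      rw [pvCharVal_digitChar _ (Nat.mod_lt _ (by omega)), pvNatDigitSum_unfold, h10]
      simp [pvNatDigitSum]
    · simp only [h10, if_false]
      rw [ih (n / 10) _ (by omega)]
      simp only [List.map_cons, List.sum_cons]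
      rw [pvCharVal_digitChar _ (Nat.mod_lt _ (by omega)), pvNatDigitSum_unfold n]
      ring

theorem pvDigitLoop_eq (f : Nat) : ∀ (n : Nat) (acc : Int), n < f →
    pvDigitLoop f (n : Int) acc = pvNatDigitSum n + acc := by
  induction f with
  | zero => intro n acc h; omega
  | succ f ih =>
    intro n acc h
    rw [pvDigitLoop]
    rcases Nat.eq_zero_or_pos n with h0 | h0
    · subst h0; simp [pvNatDigitSum]
    · simp only [show (0:Int) < (n:Int) from by exact_mod_cast h0, if_pos]
      have h1 : PySem.Int.floordiv (n : Int) 10 = ((n / 10 : Nat) : Int) := by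
        exact_mod_cast PySem.Int.floordiv_natCast n 10
      have h2 : PySem.Int.mod (n : Int) 10 = ((n % 10 : Nat) : Int) := by
        exact_mod_cast PySem.Int.mod_natCast n 10
      rw [h1, h2, ih (n / 10) _ (by have := Nat.div_lt_self h0 (show 1 < 10 by omega); omega)]
      rw [pvNatDigitSum_unfold n]
      ring

-- ===== VERDICT (by name: the statement is the Claim_ definition above) =====
theorem get_ctor_num_spec : Claim_equal_get_ctor_num := by
  intro input _ hpre
  unfold Spec_get_ctor_num get_ctor_num get_ctor_num_alt
  obtain ⟨m, rfl⟩ : ∃ m : Nat, input = (m : Int) := ⟨input.toNat, (Int.toNat_of_nonneg hpre).symm⟩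
  have hchars : PySem.Int.toChars (m : Int) = Nat.toDigits 10 m := by
    simp [PySem.Int.toChars]
  simp only [hchars, PySem.List.len_eq]
  rw [PySem.List.foldl_pyRange_zero_pyGetD' (Nat.toDigits 10 m) ' '
    (fun s c => s + (PySem.Int.ofChars? [c]).getD 0) 0]
  rw [PySem.List.foldl_add]
  have : (List.map (fun c => (PySem.Int.ofChars? [c]).getD 0) (Nat.toDigits 10 m)).sum
      = pvNatDigitSum m := by
    have := pvToDigitsCore_sum (m + 1) m [] (by omega)
    simpa [Nat.toDigits, pvCharVal] using this
  rw [this]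
  have hms : ((m : Int).toNat + 1) = m + 1 := by simp
  rw [hms, pvDigitLoop_eq (m + 1) m 0 (by omega)]
  ring_nf
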